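-- pv_equiv track=rewrite | github.com/rlite-project/RLite | rlite/train/utils/handle_parallel.py | _get_chunk_indices
-- ===== SOURCE A (Python) =====
-- def _get_chunk_indices(data_size: int, parallel_size: int) -> list[int]:
--     # Eg: len(arg)=7, dp_size=4 : [2, 2, 2, 1]
--     chunk_sizes = [data_size // parallel_size] * parallel_size
--     for i in range(data_size % parallel_size):
--         chunk_sizes[i] += 1
--     chunk_indeces = [0] * (parallel_size + 1)
--     for i in range(1, len(chunk_indeces)):
--         chunk_indeces[i] = chunk_sizes[i - 1] + chunk_indeces[i - 1]
--     return chunk_indeces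
-- ===== SOURCE B (Python) =====
-- def _get_chunk_indices(data_size: int, parallel_size: int) -> list[int]:
--     q, r = divmod(data_size, parallel_size)
--     return [i * q + min(i, r) for i in range(parallel_size + 1)]
-- ===== Notes on version B (the rewrite author's own statement) =====
-- stated objective: simpler
-- what changed: Replaces the two-loop construction (distribute the remainder over a sizes list, then prefix-sum it into boundaries) with a direct closed form per boundary: i*q + min(i, r) with q, r = divmod(data_size, parallel_size).
import Mathlib
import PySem

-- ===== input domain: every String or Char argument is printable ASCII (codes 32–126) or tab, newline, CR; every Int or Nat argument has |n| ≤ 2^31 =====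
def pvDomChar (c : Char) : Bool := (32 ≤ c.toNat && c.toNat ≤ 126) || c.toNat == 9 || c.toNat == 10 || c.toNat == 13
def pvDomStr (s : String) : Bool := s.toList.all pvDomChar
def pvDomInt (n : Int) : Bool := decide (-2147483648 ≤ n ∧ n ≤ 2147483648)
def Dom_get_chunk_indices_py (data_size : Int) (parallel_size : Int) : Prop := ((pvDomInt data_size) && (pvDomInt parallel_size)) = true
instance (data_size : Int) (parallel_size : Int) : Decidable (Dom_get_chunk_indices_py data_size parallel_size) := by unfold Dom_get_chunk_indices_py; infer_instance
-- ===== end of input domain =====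

-- B replaces A's two loops (remainder distribution + prefix sum) by the closed form i*q + min(i, r); objective: simpler.


-- ===== PORT A =====
-- [x]*n is [] for n ≤ 0, hence List.replicate n.toNat; in-range assignment xs[i] = v (0 ≤ i < len,
-- guaranteed here since 0 ≤ i < data_size % parallel_size < parallel_size) is List.set i.toNat.
def get_chunk_indices_py (data_size : Int) (parallel_size : Int) : List Int :=
  -- chunk_sizes = [data_size // parallel_size] * parallel_size
  let chunk_sizes := List.replicate parallel_size.toNat (PySem.Int.floordiv data_size parallel_size)
  -- for i in range(data_size % parallel_size): chunk_sizes[i] += 1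
  let chunk_sizes := (PySem.List.pyRange 0 (PySem.Int.mod data_size parallel_size) 1).foldl
      (fun cs i => cs.set i.toNat (PySem.List.pyGetD cs i 0 + 1)) chunk_sizes
  -- chunk_indeces = [0] * (parallel_size + 1)
  let chunk_indeces : List Int := List.replicate (parallel_size + 1).toNat 0
  -- for i in range(1, len(chunk_indeces)): chunk_indeces[i] = chunk_sizes[i-1] + chunk_indeces[i-1]
  (PySem.List.pyRange 1 (chunk_indeces.length : Int) 1).foldl
      (fun ci i => ci.set i.toNat (PySem.List.pyGetD chunk_sizes (i - 1) 0 + PySem.List.pyGetD ci (i - 1) 0)) chunk_indeces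

-- ===== PORT B =====
def get_chunk_indices_py_alt (data_size : Int) (parallel_size : Int) : List Int :=
  let q := PySem.Int.floordiv data_size parallel_size
  let r := PySem.Int.mod data_size parallel_size
  (PySem.List.pyRange 0 (parallel_size + 1) 1).map (fun i => i * q + min i r)

-- ===== PRECONDITION & SPEC =====
-- Pre_ excludes exactly parallel_size = 0, where A (and B) raise ZeroDivisionError.
def Pre_get_chunk_indices_py (data_size : Int) (parallel_size : Int) : Prop := parallel_size ≠ 0
instance (data_size : Int) (parallel_size : Int) : Decidable (Pre_get_chunk_indices_py data_size parallel_size) := by unfold Pre_get_chunk_indices_py; infer_instance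
def pvWitness_get_chunk_indices_py : Int × Int := (7, 4)

def Spec_get_chunk_indices_py (data_size : Int) (parallel_size : Int) (out : List Int) : Prop := out = get_chunk_indices_py_alt data_size parallel_size
instance (data_size : Int) (parallel_size : Int) (out : List Int) : Decidable (Spec_get_chunk_indices_py data_size parallel_size out) := by unfold Spec_get_chunk_indices_py; infer_instance

-- ===== CLAIM (what is proved, stated in full; the proofs are below) =====
def Claim_equal_get_chunk_indices_py : Prop := ∀ (data_size : Int) (parallel_size : Int), Dom_get_chunk_indices_py data_size parallel_size → Pre_get_chunk_indices_py data_size parallel_size → Spec_get_chunk_indices_py data_size parallel_size (get_chunk_indices_py data_size parallel_size)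

-- ===== LEMMAS AND PROOFS =====

-- After the remainder-distribution loop, chunk_sizes[j] = q + (1 if j < r else 0).
lemma sizes_loop (n : Nat) (q : Int) (k : Nat) (hk : k ≤ n) :
    (PySem.List.pyRange 0 (k : Int) 1).foldl
      (fun cs i => cs.set i.toNat (PySem.List.pyGetD cs i 0 + 1)) (List.replicate n q)
    = (List.range n).map (fun j => q + if j < k then 1 else 0) := by
  induction k with
  | zero =>
    rw [PySem.List.pyRange_one_eq_nil (by simp)]
    simp
  | succ k ih =>
    have hk' : k ≤ n := Nat.le_of_succ_le hk
    have hc : ((k + 1 : Nat) : Int) = (k : Int) + 1 := by push_cast; ring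
    rw [hc, PySem.List.pyRange_one_succ_right (by positivity), List.foldl_append, ih hk']
    simp only [List.foldl_cons, List.foldl_nil]
    rw [PySem.List.pyGetD_natCast, PySem.List.getD_map_range _ _ _ _ (by omega)]
    apply List.ext_getElem (by simp)
    intro j hj hj'
    simp only [List.length_map, List.length_range] at hj'
    rw [List.getElem_set, List.getElem_map, List.getElem_range]
    simp only [Int.toNat_natCast, List.getElem_map, List.getElem_range]
    split_ifs <;> omega

-- The prefix-sum loop computes the closed form i*q + min i r at every position below m.
lemma prefix_loop (n : Nat) (q : Int) (r : Nat) (m : Nat) (h1 : 1 ≤ m) (hm : m ≤ n + 1) :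
    (PySem.List.pyRange 1 (m : Int) 1).foldl
      (fun ci i => ci.set i.toNat
        (PySem.List.pyGetD ((List.range n).map (fun j => q + if j < r then 1 else 0)) (i - 1) 0
          + PySem.List.pyGetD ci (i - 1) 0))
      (List.replicate (n + 1) 0)
    = (List.range (n + 1)).map (fun j => if j < m then (j : Int) * q + min (j : Int) (r : Int) else 0) := by
  induction m with
  | zero => omega
  | succ m ih =>
    rcases Nat.eq_or_lt_of_le h1 with h | h
    · -- m + 1 = 1 : the loop body never runs
      have : m = 0 := by omega
      subst this
      rw [PySem.List.pyRange_one_eq_nil (by simp)]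
      simp only [List.foldl_nil]
      apply List.ext_getElem (by simp)
      intro j hj hj'
      simp only [List.length_replicate] at hj
      rw [List.getElem_replicate, List.getElem_map, List.getElem_range]
      split_ifs with hc
      · have : j = 0 := by omega
        simp [this]
      · rfl
    · have h1' : 1 ≤ m := by omega
      have hm' : m ≤ n + 1 := by omega
      have hc : ((m + 1 : Nat) : Int) = (m : Int) + 1 := by push_cast; ring
      rw [hc, PySem.List.pyRange_one_succ_right (by exact_mod_cast h1'), List.foldl_append,
        ih h1' hm']
      simp only [List.foldl_cons, List.foldl_nil]
      have e1 : ((m : Int) - 1) = ((m - 1 : Nat) : Int) := by omega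
      rw [e1, PySem.List.pyGetD_natCast, PySem.List.pyGetD_natCast,
        PySem.List.getD_map_range _ _ _ _ (by omega), PySem.List.getD_map_range _ _ _ _ (by omega)]
      apply List.ext_getElem (by simp)
      intro j hj hj'
      simp only [List.length_map, List.length_range] at hj'
      rw [List.getElem_set, List.getElem_map, List.getElem_range]
      simp only [Int.toNat_natCast, List.getElem_map, List.getElem_range]
      have hmn : m - 1 < m := by omega
      have e2 : ((m - 1 : Nat) : Int) = (m : Int) - 1 := by omega
      rw [e2]
      have hq : ((m : Int)) * q = ((m : Int) - 1) * q + q := by ring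
      split_ifs with hjm hjr hj2 <;> first | rfl | omega | (subst hjm; omega)

-- ===== VERDICT (by name: the statement is the Claim_ definition above) =====
theorem get_chunk_indices_py_spec : Claim_equal_get_chunk_indices_py := by
  intro data_size parallel_size _ hpre
  unfold Spec_get_chunk_indices_py get_chunk_indices_py get_chunk_indices_py_alt
  dsimp only
  rcases lt_or_gt_of_ne hpre with hneg | hpos
  · -- parallel_size < 0 : every list involved is empty
    have h1 : parallel_size.toNat = 0 := by omega
    have h2 : (parallel_size + 1).toNat = 0 := by omega
    have h3 := PySem.Int.mod_neg_bounds data_size hneg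
    rw [h1, h2,
      PySem.List.pyRange_one_eq_nil (a := 0) (b := PySem.Int.mod data_size parallel_size) (by omega),
      PySem.List.pyRange_one_eq_nil (a := 0) (b := parallel_size + 1) (by omega),
      PySem.List.pyRange_one_eq_nil (a := 1) (b := ((List.replicate 0 (0 : Int)).length : Int)) (by simp)]
    simp
  · -- parallel_size > 0
    obtain ⟨n, rfl⟩ : ∃ n : Nat, parallel_size = (n : Int) := ⟨parallel_size.toNat, by omega⟩
    set q := PySem.Int.floordiv data_size (n : Int) with hqdef
    have hr0 : 0 ≤ PySem.Int.mod data_size (n : Int) := PySem.Int.mod_nonneg data_size hpos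
    have hrlt : PySem.Int.mod data_size (n : Int) < n := PySem.Int.mod_lt data_size hpos
    obtain ⟨r, hr⟩ : ∃ r : Nat, PySem.Int.mod data_size (n : Int) = (r : Int) :=
      ⟨(PySem.Int.mod data_size (n : Int)).toNat, by omega⟩
    have hrn : r ≤ n := by omega
    have e1 : ((n : Int)).toNat = n := by omega
    have e2 : ((n : Int) + 1).toNat = n + 1 := by omega
    rw [hr, e1, e2, sizes_loop n q r hrn]
    have e3 : ((List.replicate (n + 1) (0 : Int)).length : Int) = ((n + 1 : Nat) : Int) := by simp
    rw [e3, prefix_loop n q r (n + 1) (by omega) (le_refl _)]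
    have e4 : (n : Int) + 1 = ((n + 1 : Nat) : Int) := by push_cast; ring
    rw [e4, PySem.List.pyRange_zero_nat, List.map_map]
    apply List.map_congr_left
    intro j hj
    simp only [List.mem_range] at hj
    simp [hj]
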